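-- pv_equiv track=rewrite | github.com/jaisal1497/sentiment-image | TextServiceDocker/app.py | find_noun_adjective
-- ===== SOURCE A (Python) =====
-- def find_noun_adjective(tags):
--     noun_tags = ['NN', 'NNS', 'NNP', 'NNPS']
--     adjective_tags = ['JJ', 'JJR', 'JJS']
--     subject, adjective = "", ""
--     for tag in tags:
--         if tag[1] in noun_tags:
--             subject = tag[0]
--         if tag[1] in adjective_tags:
--             adjective = tag[0]
--
--     return subject, adjective
-- ===== SOURCE B (Python) =====
-- def find_noun_adjective(tags):
--     noun_tags = {'NN', 'NNS', 'NNP', 'NNPS'}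
--     adjective_tags = {'JJ', 'JJR', 'JJS'}
--     subject = None
--     adjective = None
--     for word, tag in reversed(list(tags)):
--         if subject is None and tag in noun_tags:
--             subject = word
--         if adjective is None and tag in adjective_tags:
--             adjective = word
--         if subject is not None and adjective is not None:
--             break
--     return (subject if subject is not None else "",
--             adjective if adjective is not None else "")
-- ===== Notes on version B (the rewrite author's own statement) =====
-- stated objective: alternative
-- what changed: Instead of a forward pass that overwrites the subject/adjective on every match, B scans the list from the end, fixes each slot at its first (i.e. last-overall) match, and stops early once both slots are filled.
import Mathlib
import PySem

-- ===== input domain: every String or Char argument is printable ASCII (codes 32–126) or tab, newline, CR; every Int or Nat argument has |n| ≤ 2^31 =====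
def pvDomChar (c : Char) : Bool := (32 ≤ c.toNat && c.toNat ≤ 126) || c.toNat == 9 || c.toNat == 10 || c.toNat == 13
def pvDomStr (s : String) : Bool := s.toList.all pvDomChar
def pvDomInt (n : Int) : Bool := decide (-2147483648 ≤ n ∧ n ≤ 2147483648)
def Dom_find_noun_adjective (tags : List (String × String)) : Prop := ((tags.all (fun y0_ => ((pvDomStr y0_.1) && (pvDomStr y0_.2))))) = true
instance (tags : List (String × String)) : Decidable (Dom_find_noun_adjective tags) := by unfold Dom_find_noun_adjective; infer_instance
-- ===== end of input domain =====

-- ===== PORT A =====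
-- step of A's forward loop: overwrite subject/adjective on each matching tag
def pvA_step (st : String × String) (tag : String × String) : String × String :=
  let subject := if ["NN", "NNS", "NNP", "NNPS"].contains tag.2 then tag.1 else st.1
  let adjective := if ["JJ", "JJR", "JJS"].contains tag.2 then tag.1 else st.2
  (subject, adjective)

def find_noun_adjective (tags : List (String × String)) : String × String :=
  tags.foldl pvA_step ("", "")

-- ===== PORT B =====
-- B: scan from the end, fill each slot at its first match, break when both are set
def pvB_noun (t : String) : Bool := ["NN", "NNS", "NNP", "NNPS"].contains t
def pvB_adj (t : String) : Bool := ["JJ", "JJR", "JJS"].contains t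

def pvB_loop : List (String × String) → Option String × Option String → Option String × Option String
  | [], st => st
  | (w, t) :: rest, (s, a) =>
      let s' := if s.isNone && pvB_noun t then some w else s
      let a' := if a.isNone && pvB_adj t then some w else a
      if s'.isSome && a'.isSome then (s', a') else pvB_loop rest (s', a')

def find_noun_adjective_alt (tags : List (String × String)) : String × String :=
  let r := pvB_loop tags.reverse (none, none)
  (r.1.getD "", r.2.getD "")

-- ===== PRECONDITION & SPEC =====
def Spec_find_noun_adjective (tags : List (String × String)) (out : String × String) : Prop := out = find_noun_adjective_alt tags
instance (tags : List (String × String)) (out : String × String) : Decidable (Spec_find_noun_adjective tags out) := by unfold Spec_find_noun_adjective; infer_instance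

-- ===== CLAIM (what is proved, stated in full; the proofs are below) =====
def Claim_equal_find_noun_adjective : Prop := ∀ (tags : List (String × String)), Dom_find_noun_adjective tags → Spec_find_noun_adjective tags (find_noun_adjective tags)

-- ===== LEMMAS AND PROOFS =====
-- first-match helper: what B's reverse scan computes for one slot
def pvFirst (p : String → Bool) (l : List (String × String)) : Option String :=
  (l.find? (fun q => p q.2)).map Prod.fst

-- B's loop fills each slot with the first match (unless already set); the break is harmless
lemma pvB_loop_eq (l : List (String × String)) (s a : Option String) :
    pvB_loop l (s, a) = (s.or (pvFirst pvB_noun l), a.or (pvFirst pvB_adj l)) := by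
  induction l generalizing s a with
  | nil => cases s <;> cases a <;> simp [pvB_loop, pvFirst]
  | cons x rest ih =>
      obtain ⟨w, t⟩ := x
      cases s <;> cases a <;>
        simp only [pvB_loop, pvFirst, List.find?, Option.isNone, Option.isSome,
          Bool.true_and, Bool.false_and] <;>
        cases hn : pvB_noun t <;> cases ha : pvB_adj t <;>
        simp [ih, pvFirst, Option.or]

-- A's forward fold ends with the last match in each slot (default = the initial state)
lemma pvA_fold_eq (l : List (String × String)) (st : String × String) :
    l.foldl pvA_step st =
      ((pvFirst pvB_noun l.reverse).getD st.1, (pvFirst pvB_adj l.reverse).getD st.2) := by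
  induction l generalizing st with
  | nil => simp [pvFirst]
  | cons x rest ih =>
      obtain ⟨w, t⟩ := x
      rw [List.foldl_cons, ih]
      simp only [List.reverse_cons, pvFirst, List.find?_append]
      cases hn : List.find? (fun q => pvB_noun q.2) rest.reverse <;>
      cases ha : List.find? (fun q => pvB_adj q.2) rest.reverse <;>
        simp [pvA_step, pvB_noun, pvB_adj, List.find?] <;>
        (repeat' split) <;> simp_all

-- ===== VERDICT (by name: the statement is the Claim_ definition above) =====
theorem find_noun_adjective_spec : Claim_equal_find_noun_adjective := by
  intro tags _
  unfold Spec_find_noun_adjective find_noun_adjective find_noun_adjective_alt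
  rw [pvA_fold_eq, pvB_loop_eq]
  simp [Option.or]
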